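-- pv_equiv track=rewrite | github.com/LaraGastaldi/edabit_exercises | upperlower.py | steps_to_convert
-- ===== SOURCE A (Python) =====
-- def steps_to_convert(string):
--     countupper = 0
--     countlower = 0
--     for letter in string:
--         if letter.isupper():
--             countupper += 1
--         else:
--             countlower += 1
--     return min(countupper, countlower)
-- ===== SOURCE B (Python) =====
-- def steps_to_convert(string):
--     s = sorted(string, key=str.isupper)
--     lo = next((i for i, c in enumerate(s) if c.isupper()), len(s))
--     return min(lo, len(s) - lo)
-- ===== Notes on version B (the rewrite author's own statement) =====
-- stated objective: alternative
-- what changed: Replaces the counting loop entirely by a sort-then-scan: stably sort the characters by isupper (non-upper first), locate the first uppercase character; that boundary index is the lower count and min(lo, len-lo) is the answer.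
import Mathlib
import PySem

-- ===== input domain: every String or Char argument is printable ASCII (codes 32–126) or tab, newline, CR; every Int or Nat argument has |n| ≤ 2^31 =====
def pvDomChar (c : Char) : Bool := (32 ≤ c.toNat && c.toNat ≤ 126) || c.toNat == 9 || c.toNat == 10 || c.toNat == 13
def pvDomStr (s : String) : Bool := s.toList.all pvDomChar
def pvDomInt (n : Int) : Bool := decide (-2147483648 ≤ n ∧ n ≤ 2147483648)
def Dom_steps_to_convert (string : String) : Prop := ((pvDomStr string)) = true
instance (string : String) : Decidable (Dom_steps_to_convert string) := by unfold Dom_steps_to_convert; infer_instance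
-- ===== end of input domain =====

-- ===== PORT A =====
-- B replaces the counting loop by sort-then-scan: stably sort characters by isupper and
-- read the lower count off as the index of the first uppercase character (objective: alternative).
def steps_to_convert (string : String) : Int :=
  let p := string.toList.foldl
    (fun (acc : Int × Int) letter =>
      if PySem.Chars.isupper letter then (acc.1 + 1, acc.2) else (acc.1, acc.2 + 1))
    (0, 0)
  min p.1 p.2

-- ===== PORT B =====
def steps_to_convert_alt (string : String) : Int :=
  let s := PySem.List.sorted string.toList (fun c => PySem.Chars.isupper c) false
  let lo : Int :=
    match (PySem.List.enumerate s 0).find? (fun p => PySem.Chars.isupper p.2) with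
    | some p => p.1
    | none => (s.length : Int)
  min lo ((s.length : Int) - lo)

-- ===== PRECONDITION & SPEC =====
def Spec_steps_to_convert (string : String) (out : Int) : Prop := out = steps_to_convert_alt string
instance (string : String) (out : Int) : Decidable (Spec_steps_to_convert string out) := by unfold Spec_steps_to_convert; infer_instance

-- ===== CLAIM (what is proved, stated in full; the proofs are below) =====
def Claim_equal_steps_to_convert : Prop := ∀ (string : String), Dom_steps_to_convert string → Spec_steps_to_convert string (steps_to_convert string)

-- ===== LEMMAS AND PROOFS =====

-- A's loop computes (uppercase count, remaining count).
theorem foldl_count (l : List Char) (cu cl : Int) :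
    l.foldl (fun (acc : Int × Int) letter =>
      if PySem.Chars.isupper letter then (acc.1 + 1, acc.2) else (acc.1, acc.2 + 1)) (cu, cl)
    = (cu + (l.countP (fun c => PySem.Chars.isupper c) : Int),
       cl + (l.countP (fun c => !PySem.Chars.isupper c) : Int)) := by
  induction l generalizing cu cl with
  | nil => simp
  | cons c t ih =>
    by_cases h : PySem.Chars.isupper c = true <;>
      simp [List.foldl_cons, h, ih] <;> ring

-- In a list whose isupper-keys are nondecreasing, the first uppercase position equals
-- the number of non-uppercase characters (offset by the enumeration start).
theorem find_enum (s : List Char) (n : Int)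
    (h : s.Pairwise (fun a b => PySem.Chars.isupper a ≤ PySem.Chars.isupper b)) :
    ((PySem.List.enumerate s n).find? (fun p => PySem.Chars.isupper p.2)).map (·.1)
      = if s.countP (fun c => !PySem.Chars.isupper c) = s.length then none
        else some (n + (s.countP (fun c => !PySem.Chars.isupper c) : Int)) := by
  induction s generalizing n with
  | nil => simp [PySem.List.enumerate_nil]
  | cons c t ih =>
    rcases List.pairwise_cons.mp h with ⟨hc, ht⟩
    rw [PySem.List.enumerate_cons]
    by_cases hu : PySem.Chars.isupper c = true
    · have hzero : t.countP (fun c => !PySem.Chars.isupper c) = 0 := by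
        rw [List.countP_eq_zero]
        intro b hb
        have h1 := hc b hb
        rw [hu] at h1
        have hib : PySem.Chars.isupper b = true := by
          cases hib : PySem.Chars.isupper b
          · rw [hib] at h1; exact absurd h1 (by decide)
          · rfl
        simp [hib]
      have hlt : (c :: t).countP (fun c => !PySem.Chars.isupper c) ≠ (c :: t).length := by
        simp [hu, hzero]
      simp [List.find?, hu, hzero]
    · have hu' : PySem.Chars.isupper c = false := by simpa using hu
      have := ih (n + 1) ht
      by_cases hz : t.countP (fun c => !PySem.Chars.isupper c) = t.length <;>
        simp [List.find?, hu', hz, this] <;> ring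

theorem steps_to_convert_spec : Claim_equal_steps_to_convert := by
  intro str _
  unfold Spec_steps_to_convert steps_to_convert steps_to_convert_alt
  rw [foldl_count]
  set l := str.toList with hl
  set s := PySem.List.sorted l (fun c => PySem.Chars.isupper c) false with hs
  have hperm : s.Perm l := PySem.List.sorted_perm ..
  have hpw : s.Pairwise (fun a b => PySem.Chars.isupper a ≤ PySem.Chars.isupper b) :=
    PySem.List.sorted_pairwise ..
  have hcu : s.countP (fun c => PySem.Chars.isupper c) = l.countP (fun c => PySem.Chars.isupper c) :=
    hperm.countP_eq _
  have hcl : s.countP (fun c => !PySem.Chars.isupper c) = l.countP (fun c => !PySem.Chars.isupper c) :=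
    hperm.countP_eq _
  have hlen : s.length = l.length := hperm.length_eq
  have hsum := List.length_eq_countP_add_countP (l := l) (p := fun c => PySem.Chars.isupper c)
  have hbridge : l.countP (fun a => decide ¬(PySem.Chars.isupper a = true))
      = l.countP (fun c => !PySem.Chars.isupper c) := by
    congr 1
    funext a
    cases PySem.Chars.isupper a <;> simp
  rw [hbridge] at hsum
  have hfind := find_enum s 0 hpw
  by_cases hz : s.countP (fun c => !PySem.Chars.isupper c) = s.length
  · -- no uppercase character at all
    rw [if_pos hz] at hfind
    rcases Option.map_eq_none_iff.mp hfind with hnone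
    simp only [hnone]
    have hcu0 : l.countP (fun c => PySem.Chars.isupper c) = 0 := by omega
    simp [hcu0, hlen]
  · rw [if_neg hz] at hfind
    rcases hx : (PySem.List.enumerate s 0).find? (fun p => PySem.Chars.isupper p.2) with _ | p
    · rw [hx] at hfind; simp at hfind
    · rw [hx] at hfind
      have hp1 : (p.1 : Int) = (s.countP (fun c => !PySem.Chars.isupper c) : Int) := by
        simp at hfind; omega
      simp only [hx]
      rw [hcl] at hp1
      rw [hlen]
      omega
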